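-- pv_equiv track=rewrite | github.com/ventolab/cellphonedbviz | utils/utils.py | sort_cell_type_pairs
-- ===== SOURCE A (Python) =====
-- from collections import OrderedDict
--
-- def sort_cell_type_pairs(cell_type_pairs, result_dict, separator) -> (list, dict):
--     if 'cell_type2microenvironments' not in result_dict:
--         selected_cell_type_pairs = sorted(cell_type_pairs)
--         ct_pair2me = {ctp: 'all' for ctp in selected_cell_type_pairs}
--         return selected_cell_type_pairs, ct_pair2me
--     else:
--         ct2mes = result_dict['cell_type2microenvironments']
--         # Microenvironments are used - sort selected_cell_type_pairs by microenvironment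
--         ct_pair2me = {}
--         me2ct_pairs = {}
--         for ct_pair in cell_type_pairs:
--             ct1 = ct_pair.split(separator)[0]
--             ct2 = ct_pair.split(separator)[1]
--             mes1 = ct2mes[ct1]
--             mes2 = ct2mes[ct2]
--             if len(mes1) == 1 and mes1[0] in mes2:
--                 me = mes1[0]
--             elif len(mes2) == 1 and mes2[0] in mes1:
--                 me = mes2[0]
--             else:
--                 me = 'multiple'
--             ct_pair2me[ct_pair] = me
--             if me not in me2ct_pairs:
--                 me2ct_pairs[me] = set([])
--             me2ct_pairs[me].add(ct_pair)
--         # Collate ct_pair2me.keys into a single list (sorted_selected_cell_type_pairs)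
--         # sorting cell type pairs within each micro-environment alphabetically
--         sorted_selected_cell_type_pairs = []
--         for me in OrderedDict(sorted(me2ct_pairs.items())):
--             sorted_selected_cell_type_pairs += sorted(list(me2ct_pairs[me]))
--         return sorted_selected_cell_type_pairs, ct_pair2me
-- ===== SOURCE B (Python) =====
-- def sort_cell_type_pairs(cell_type_pairs, result_dict, separator) -> (list, dict):
--     if 'cell_type2microenvironments' not in result_dict:
--         selected_cell_type_pairs = sorted(cell_type_pairs)
--         ct_pair2me = {ctp: 'all' for ctp in selected_cell_type_pairs}
--         return selected_cell_type_pairs, ct_pair2me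
--     ct2mes = result_dict['cell_type2microenvironments']
--
--     def label(ct_pair):
--         parts = ct_pair.split(separator)
--         mes1 = ct2mes[parts[0]]
--         mes2 = ct2mes[parts[1]]
--         if len(mes1) == 1 and mes1[0] in mes2:
--             return mes1[0]
--         if len(mes2) == 1 and mes2[0] in mes1:
--             return mes2[0]
--         return 'multiple'
--
--     ct_pair2me = {ctp: label(ctp) for ctp in dict.fromkeys(cell_type_pairs)}
--     sorted_selected_cell_type_pairs = sorted(ct_pair2me, key=lambda c: (ct_pair2me[c], c))
--     return sorted_selected_cell_type_pairs, ct_pair2me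
-- ===== Notes on version B (the rewrite author's own statement) =====
-- stated objective: simpler
-- what changed: Dropped the me2ct_pairs dict-of-sets and the group-concatenate pass: B labels each distinct pair once (dict.fromkeys dedup) and produces the ordered list with a single compound-key sort sorted(ct_pair2me, key=lambda c: (ct_pair2me[c], c)).
import Mathlib
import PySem

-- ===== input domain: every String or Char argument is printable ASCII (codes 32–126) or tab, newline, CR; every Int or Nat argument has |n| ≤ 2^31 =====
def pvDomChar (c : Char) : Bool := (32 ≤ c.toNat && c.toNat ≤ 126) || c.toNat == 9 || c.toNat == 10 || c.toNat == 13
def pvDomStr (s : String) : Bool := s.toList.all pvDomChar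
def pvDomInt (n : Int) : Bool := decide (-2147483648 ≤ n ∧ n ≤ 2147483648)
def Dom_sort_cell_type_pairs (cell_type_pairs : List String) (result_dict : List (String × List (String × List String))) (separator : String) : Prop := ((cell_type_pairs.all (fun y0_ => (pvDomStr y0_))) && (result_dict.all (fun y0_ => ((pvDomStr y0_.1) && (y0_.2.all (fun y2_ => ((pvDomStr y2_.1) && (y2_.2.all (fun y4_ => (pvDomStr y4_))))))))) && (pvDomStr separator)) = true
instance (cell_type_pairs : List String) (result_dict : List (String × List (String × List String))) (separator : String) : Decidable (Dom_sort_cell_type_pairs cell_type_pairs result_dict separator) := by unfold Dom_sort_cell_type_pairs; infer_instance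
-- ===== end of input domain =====

-- B replaces A's dict-of-sets grouping and group-concatenation pass by a single
-- compound-key sort of the deduplicated labelled pairs (objective: simpler).


-- ===== PORT A =====
def sort_cell_type_pairs (cell_type_pairs : List String) (result_dict : List (String × List (String × List String))) (separator : String) : List String × (List (String × String)) :=
  match (PySem.Dict.mk result_dict).get? "cell_type2microenvironments" with
  | none =>
      let selected_cell_type_pairs := PySem.List.sorted cell_type_pairs (fun x => x) false
      let ct_pair2me := selected_cell_type_pairs.foldl (fun d ctp => d.insert ctp "all") (PySem.Dict.empty : PySem.Dict String String)
      (selected_cell_type_pairs, ct_pair2me.items)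
  | some ct2mes_raw =>
      let ct2mes : PySem.Dict String (List String) := PySem.Dict.mk ct2mes_raw
      -- the loop carries (ct_pair2me, me2ct_pairs); split/index/key errors are excluded by Pre_
      let st := cell_type_pairs.foldl
        (fun (st : PySem.Dict String String × PySem.Dict String (PySem.Set String)) ct_pair =>
          let ct1 := PySem.List.pyGetD ((PySem.Str.split? ct_pair separator).getD []) 0 ""
          let ct2 := PySem.List.pyGetD ((PySem.Str.split? ct_pair separator).getD []) 1 ""
          let mes1 := ct2mes.getD ct1 []
          let mes2 := ct2mes.getD ct2 []
          let me := if mes1.length = 1 ∧ PySem.List.pyGetD mes1 0 "" ∈ mes2 then PySem.List.pyGetD mes1 0 ""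
                    else if mes2.length = 1 ∧ PySem.List.pyGetD mes2 0 "" ∈ mes1 then PySem.List.pyGetD mes2 0 ""
                    else "multiple"
          -- 'if me not in me2ct_pairs: me2ct_pairs[me] = set()' followed by 'me2ct_pairs[me].add(ct_pair)'
          (st.1.insert ct_pair me, st.2.modify me PySem.Set.empty (fun s => PySem.Set.add s ct_pair)))
        ((PySem.Dict.empty, PySem.Dict.empty) : PySem.Dict String String × PySem.Dict String (PySem.Set String))
      -- 'for me in OrderedDict(sorted(me2ct_pairs.items()))': dict keys are unique, so Python's
      -- tuple comparison of items is decided at the key — sorting the items by their key is exact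
      let sorted_selected_cell_type_pairs :=
        (PySem.List.sorted st.2.items (fun p => p.1) false).foldl
          (fun acc p => acc ++ PySem.List.sorted (st.2.getD p.1 PySem.Set.empty) (fun x => x) false) []
      (sorted_selected_cell_type_pairs, st.1.items)

-- ===== PORT B =====
-- helper 'label' of Source B
def pvLabel (ct2mes : PySem.Dict String (List String)) (separator ct_pair : String) : String :=
  let parts := (PySem.Str.split? ct_pair separator).getD []
  let mes1 := ct2mes.getD (PySem.List.pyGetD parts 0 "") []
  let mes2 := ct2mes.getD (PySem.List.pyGetD parts 1 "") []
  if mes1.length = 1 ∧ PySem.List.pyGetD mes1 0 "" ∈ mes2 then PySem.List.pyGetD mes1 0 ""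
  else if mes2.length = 1 ∧ PySem.List.pyGetD mes2 0 "" ∈ mes1 then PySem.List.pyGetD mes2 0 ""
  else "multiple"

def sort_cell_type_pairs_alt (cell_type_pairs : List String) (result_dict : List (String × List (String × List String))) (separator : String) : List String × (List (String × String)) :=
  match (PySem.Dict.mk result_dict).get? "cell_type2microenvironments" with
  | none =>
      let selected_cell_type_pairs := PySem.List.sorted cell_type_pairs (fun x => x) false
      let ct_pair2me := selected_cell_type_pairs.foldl (fun d ctp => d.insert ctp "all") (PySem.Dict.empty : PySem.Dict String String)
      (selected_cell_type_pairs, ct_pair2me.items)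
  | some ct2mes_raw =>
      let ct2mes : PySem.Dict String (List String) := PySem.Dict.mk ct2mes_raw
      -- {ctp: label(ctp) for ctp in dict.fromkeys(cell_type_pairs)}
      let ct_pair2me := (PySem.List.dedup cell_type_pairs).foldl
        (fun d ctp => d.insert ctp (pvLabel ct2mes separator ctp)) (PySem.Dict.empty : PySem.Dict String String)
      -- sorted(ct_pair2me, key=lambda c: (ct_pair2me[c], c))
      let ordered := PySem.List.sorted2 ct_pair2me.keys (fun c => ct_pair2me.getD c "") (fun c => c) false
      (ordered, ct_pair2me.items)

-- ===== PRECONDITION & SPEC =====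
-- Pre_ excludes exactly the inputs where Python A raises: an empty separator (ValueError in split),
-- a pair that splits into fewer than two parts (IndexError), or a part missing from ct2mes (KeyError)
-- — all only when 'cell_type2microenvironments' is present.
def Pre_sort_cell_type_pairs (cell_type_pairs : List String) (result_dict : List (String × List (String × List String))) (separator : String) : Prop :=
  (PySem.Dict.mk result_dict).contains "cell_type2microenvironments" = true →
    (separator ≠ "" ∧ ∀ ctp ∈ cell_type_pairs,
      2 ≤ ((PySem.Str.split? ctp separator).getD []).length ∧
      (PySem.Dict.mk ((PySem.Dict.mk result_dict).getD "cell_type2microenvironments" [])).contains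
        (PySem.List.pyGetD ((PySem.Str.split? ctp separator).getD []) 0 "") = true ∧
      (PySem.Dict.mk ((PySem.Dict.mk result_dict).getD "cell_type2microenvironments" [])).contains
        (PySem.List.pyGetD ((PySem.Str.split? ctp separator).getD []) 1 "") = true)
instance (cell_type_pairs : List String) (result_dict : List (String × List (String × List String))) (separator : String) : Decidable (Pre_sort_cell_type_pairs cell_type_pairs result_dict separator) := by unfold Pre_sort_cell_type_pairs; infer_instance

def pvWitness_sort_cell_type_pairs : List String × (List (String × List (String × List String))) × String :=
  (["B|A", "A|A"], [("cell_type2microenvironments", [("A", ["m1"]), ("B", ["m1", "m2"])])], "|")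

def Spec_sort_cell_type_pairs (cell_type_pairs : List String) (result_dict : List (String × List (String × List String))) (separator : String) (out : List String × (List (String × String))) : Prop := out = sort_cell_type_pairs_alt cell_type_pairs result_dict separator
instance (cell_type_pairs : List String) (result_dict : List (String × List (String × List String))) (separator : String) (out : List String × (List (String × String))) : Decidable (Spec_sort_cell_type_pairs cell_type_pairs result_dict separator out) := by unfold Spec_sort_cell_type_pairs; infer_instance

-- ===== CLAIM (what is proved, stated in full; the proofs are below) =====
def Claim_equal_sort_cell_type_pairs : Prop := ∀ (cell_type_pairs : List String) (result_dict : List (String × List (String × List String))) (separator : String), Dom_sort_cell_type_pairs cell_type_pairs result_dict separator → Pre_sort_cell_type_pairs cell_type_pairs result_dict separator → Spec_sort_cell_type_pairs cell_type_pairs result_dict separator (sort_cell_type_pairs cell_type_pairs result_dict separator)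

-- ===== LEMMAS AND PROOFS =====

theorem pv_items_foldl_insert (f : String → String) (l : List String) : ∀ (S : List String)
    (d : PySem.Dict String String), S.Nodup →
    d.items = S.map (fun c => (c, f c)) →
    (l.foldl (fun d c => d.insert c (f c)) d).items
      = (PySem.Set.update S l).map (fun c => (c, f c)) := by
  induction l with
  | nil => intro S d hS hd; simpa [PySem.Set.update] using hd
  | cons x t ih =>
    intro S d hS hd
    have hkeys : d.keys = S := by
      simp [PySem.Dict.keys, hd]
      exact List.map_id S
    have hcont : d.contains x = decide (x ∈ S) := by
      rw [PySem.Dict.contains_eq_decide_mem_keys, hkeys]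
    by_cases hx : x ∈ S
    · have h1 : (d.insert x (f x)).items = S.map (fun c => (c, f c)) := by
        rw [PySem.Dict.items_insert, hcont]
        simp only [hx, decide_true, if_true, hd, List.map_map]
        apply List.map_congr_left
        intro c hc
        by_cases h : c = x <;> simp [Function.comp, h]
      have hadd : PySem.Set.add S x = S := by simp [PySem.Set.add, PySem.Set.contains, hx]
      simp only [List.foldl_cons]
      rw [ih S _ hS h1]
      simp [PySem.Set.update, hadd]
    · have h1 : (d.insert x (f x)).items = (S ++ [x]).map (fun c => (c, f c)) := by
        rw [PySem.Dict.items_insert, hcont]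
        simp [hx, hd]
      have hadd : PySem.Set.add S x = S ++ [x] := by simp [PySem.Set.add, PySem.Set.contains, hx]
      simp only [List.foldl_cons]
      rw [ih (S ++ [x]) _ (by simp [List.nodup_append, hS]; exact fun a ha he => hx (he ▸ ha)) h1]
      simp [PySem.Set.update, hadd]

theorem pv_upd_cons {α : Type} [BEq α] (s : PySem.Set α) (x : α) (r : List α) :
    PySem.Set.update s (x :: r) = PySem.Set.update (s.add x) r := rfl

theorem pv_getD_grp (lab : String → String) (l : List String) : ∀
    (d : PySem.Dict String (PySem.Set String)) (m : String),
    (l.foldl (fun d c => d.modify (lab c) PySem.Set.empty (fun s => PySem.Set.add s c)) d).getD m PySem.Set.empty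
      = PySem.Set.update (d.getD m PySem.Set.empty) (l.filter (fun c => lab c == m)) := by
  induction l with
  | nil => intro d m; simp [PySem.Set.update]
  | cons x t ih =>
    intro d m
    simp only [List.foldl_cons, List.filter_cons]
    by_cases h : lab x = m
    · simp only [h, beq_self_eq_true, if_true]
      rw [ih, pv_upd_cons]
      congr 1
      rw [PySem.Dict.getD_modify]
      simp
    · have hb : (lab x == m) = false := by simp [h]
      simp only [hb]
      rw [ih]
      congr 1
      rw [PySem.Dict.getD_modify]
      simp [Ne.symm h]

theorem pv_sorted2_lex (xs : List String) (k1 k2 : String → String) :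
    PySem.List.sorted2 xs k1 k2 false
      = PySem.List.sorted xs (fun c => (toLex (k1 c, k2 c) : Lex (String × String))) false := by
  simp only [PySem.List.sorted2, PySem.List.sorted]
  have h : (fun (a b : String) => decide (k1 a < k1 b) || (!decide (k1 b < k1 a) && decide (k2 a < k2 b)))
      = (fun (a b : String) => decide ((toLex (k1 a, k2 a) : Lex (String × String)) < toLex (k1 b, k2 b))) := by
    funext a b
    have hiff : ((toLex (k1 a, k2 a) : Lex (String × String)) < toLex (k1 b, k2 b)) ↔
        (k1 a < k1 b ∨ (k1 a = k1 b ∧ k2 a < k2 b)) := by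
      rw [Prod.Lex.lt_iff]; exact Iff.rfl
    by_cases hd : ((toLex (k1 a, k2 a) : Lex (String × String)) < toLex (k1 b, k2 b))
    · rw [decide_eq_true hd]
      rcases hiff.mp hd with h1 | ⟨h1, h2⟩
      · simp [h1]
      · simp [h1, h2]
    · rw [decide_eq_false hd]
      have h1 : ¬ k1 a < k1 b := fun hh => hd (hiff.mpr (Or.inl hh))
      have h2 : k1 a = k1 b → ¬ k2 a < k2 b := fun he hh => hd (hiff.mpr (Or.inr ⟨he, hh⟩))
      by_cases h3 : k1 b < k1 a
      · simp [h1, h3]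
      · have heq : k1 a = k1 b := le_antisymm (not_lt.mp h3) (not_lt.mp h1)
        simp [h1, h3, h2 heq]
  simp only [if_neg (by decide : ¬ (false = true))] at *
  rw [h]

theorem pv_sorted_map {ν : Type} (g : String → ν) (keys : List String) (hnd : keys.Nodup) :
    PySem.List.sorted (keys.map (fun k => (k, g k))) (fun p => p.1) false
      = (PySem.List.sorted keys (fun x => x) false).map (fun k => (k, g k)) := by
  apply PySem.List.sorted_eq_of_perm_of_pairwise_lt
  · exact (PySem.List.sorted_perm keys (fun x => x) false).map _
  · rw [List.pairwise_map]
    have hle := PySem.List.sorted_pairwise keys (fun x => x)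
    have hnd' : (PySem.List.sorted keys (fun x => x) false).Nodup :=
      (PySem.List.sorted_perm keys (fun x => x) false).nodup_iff.mpr hnd
    exact (hle.and hnd').imp (fun h => lt_of_le_of_ne h.1 h.2)

theorem pv_flatMap_perm {α : Type} (f g : α → List String) : ∀ (M : List α),
    (∀ m ∈ M, (f m).Perm (g m)) → (M.flatMap f).Perm (M.flatMap g) := by
  intro M
  induction M with
  | nil => intro _; simp
  | cons m t ih =>
    intro h
    simp only [List.flatMap_cons]
    exact (h m (by simp)).append (ih (fun x hx => h x (by simp [hx])))

theorem pv_partition_perm (lab : String → String) : ∀ (M u : List String), M.Nodup →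
    (∀ c ∈ u, lab c ∈ M) →
    (M.flatMap (fun m => u.filter (fun c => lab c == m))).Perm u := by
  intro M
  induction M with
  | nil =>
    intro u _ hu
    have : u = [] := by
      cases u with
      | nil => rfl
      | cons a t => exact absurd (hu a (by simp)) (by simp)
    simp [this]
  | cons m t ih =>
    intro u hM hu
    simp only [List.flatMap_cons]
    have hcong : ∀ m' ∈ t, u.filter (fun c => lab c == m')
        = (u.filter (fun c => !(lab c == m))).filter (fun c => lab c == m') := by
      intro m' hm'
      rw [List.filter_filter]
      apply List.filter_congr
      intro c _
      have hmm : m' ≠ m := fun he => (List.nodup_cons.mp hM).1 (he ▸ hm')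
      by_cases h : lab c = m'
      · simp [h, hmm]
      · simp [h]
    have h2 : (t.flatMap (fun m' => u.filter (fun c => lab c == m')))
        = t.flatMap (fun m' => (u.filter (fun c => !(lab c == m))).filter (fun c => lab c == m')) := by
      simp only [List.flatMap]
      congr 1
      exact List.map_congr_left hcong
    rw [h2]
    have h3 := ih (u.filter (fun c => !(lab c == m))) (List.nodup_cons.mp hM).2 (by
      intro c hc
      have hcm := List.of_mem_filter hc
      have := hu c (List.mem_of_mem_filter hc)
      simp at hcm
      simpa [hcm] using this)
    exact (List.Perm.append_left _ h3).trans (List.filter_append_perm _ u)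

-- the else-branch of A equals the else-branch of B
theorem pv_main (l : List String) (raw : List (String × List String)) (sep : String) :
    (let ct2mes : PySem.Dict String (List String) := PySem.Dict.mk raw
     let st := l.foldl
        (fun (st : PySem.Dict String String × PySem.Dict String (PySem.Set String)) ct_pair =>
          let ct1 := PySem.List.pyGetD ((PySem.Str.split? ct_pair sep).getD []) 0 ""
          let ct2 := PySem.List.pyGetD ((PySem.Str.split? ct_pair sep).getD []) 1 ""
          let mes1 := ct2mes.getD ct1 []
          let mes2 := ct2mes.getD ct2 []
          let me := if mes1.length = 1 ∧ PySem.List.pyGetD mes1 0 "" ∈ mes2 then PySem.List.pyGetD mes1 0 ""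
                    else if mes2.length = 1 ∧ PySem.List.pyGetD mes2 0 "" ∈ mes1 then PySem.List.pyGetD mes2 0 ""
                    else "multiple"
          (st.1.insert ct_pair me, st.2.modify me PySem.Set.empty (fun s => PySem.Set.add s ct_pair)))
        ((PySem.Dict.empty, PySem.Dict.empty) : PySem.Dict String String × PySem.Dict String (PySem.Set String))
     ((PySem.List.sorted st.2.items (fun p => p.1) false).foldl
          (fun acc p => acc ++ PySem.List.sorted (st.2.getD p.1 PySem.Set.empty) (fun x => x) false) [],
      st.1.items))
    = (let ct2mes : PySem.Dict String (List String) := PySem.Dict.mk raw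
       let ct_pair2me := (PySem.List.dedup l).foldl
         (fun d ctp => d.insert ctp (pvLabel ct2mes sep ctp)) (PySem.Dict.empty : PySem.Dict String String)
       (PySem.List.sorted2 ct_pair2me.keys (fun c => ct_pair2me.getD c "") (fun c => c) false,
        ct_pair2me.items)) := by
  set lab : String → String := pvLabel (PySem.Dict.mk raw) sep with hlab
  -- the A loop body, in paired form
  have hbody : (fun (st : PySem.Dict String String × PySem.Dict String (PySem.Set String)) ct_pair =>
          let ct1 := PySem.List.pyGetD ((PySem.Str.split? ct_pair sep).getD []) 0 ""
          let ct2 := PySem.List.pyGetD ((PySem.Str.split? ct_pair sep).getD []) 1 ""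
          let mes1 := (PySem.Dict.mk raw).getD ct1 []
          let mes2 := (PySem.Dict.mk raw).getD ct2 []
          let me := if mes1.length = 1 ∧ PySem.List.pyGetD mes1 0 "" ∈ mes2 then PySem.List.pyGetD mes1 0 ""
                    else if mes2.length = 1 ∧ PySem.List.pyGetD mes2 0 "" ∈ mes1 then PySem.List.pyGetD mes2 0 ""
                    else "multiple"
          (st.1.insert ct_pair me, st.2.modify me PySem.Set.empty (fun s => PySem.Set.add s ct_pair)))
      = (fun st ct_pair => (st.1.insert ct_pair (lab ct_pair),
          st.2.modify (lab ct_pair) PySem.Set.empty (fun s => PySem.Set.add s ct_pair))) := rfl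
  simp only []
  rw [hbody]
  have hsplit : List.foldl (fun (st : PySem.Dict String String × PySem.Dict String (PySem.Set String)) ct_pair =>
        (st.1.insert ct_pair (lab ct_pair),
         st.2.modify (lab ct_pair) PySem.Set.empty (fun s => PySem.Set.add s ct_pair)))
      (PySem.Dict.empty, PySem.Dict.empty) l
      = (List.foldl (fun d c => d.insert c (lab c)) PySem.Dict.empty l,
         List.foldl (fun d c => d.modify (lab c) PySem.Set.empty (fun s => PySem.Set.add s c)) PySem.Dict.empty l) :=
    PySem.List.foldl_prod_mk (fun (d : PySem.Dict String String) c => d.insert c (lab c))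
      (fun (d : PySem.Dict String (PySem.Set String)) c => d.modify (lab c) PySem.Set.empty (fun s => PySem.Set.add s c))
      l PySem.Dict.empty PySem.Dict.empty
  rw [hsplit]
  -- abbreviations
  have hlabB : (fun (d : PySem.Dict String String) ctp => d.insert ctp (pvLabel (PySem.Dict.mk raw) sep ctp))
      = (fun d ctp => d.insert ctp (lab ctp)) := by rw [hlab]
  rw [hlabB]
  -- the two ct_pair2me dicts are equal
  have hF1 : (List.foldl (fun d c => d.insert c (lab c)) PySem.Dict.empty l).items
      = (PySem.List.dedup l).map (fun c => (c, lab c)) := by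
    have h := pv_items_foldl_insert lab l [] PySem.Dict.empty (by simp) rfl
    rw [h, PySem.Set.update_nil_left, ← PySem.List.dedup_eq_ofList]
  have hBitems : (List.foldl (fun d c => d.insert c (lab c)) PySem.Dict.empty (PySem.List.dedup l)).items
      = (PySem.List.dedup l).map (fun c => (c, lab c)) := by
    have h := pv_items_foldl_insert lab (PySem.List.dedup l) [] PySem.Dict.empty (by simp) rfl
    rw [h, PySem.Set.update_nil_left, PySem.Set.ofList_eq_self_of_nodup _ (PySem.List.nodup_dedup l)]
  have hBF : (List.foldl (fun d c => d.insert c (lab c)) PySem.Dict.empty l)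
      = (List.foldl (fun d c => d.insert c (lab c)) PySem.Dict.empty (PySem.List.dedup l)) :=
    PySem.Dict.ext (hF1.trans hBitems.symm)
  rw [hBF]
  set B := List.foldl (fun d c => d.insert c (lab c)) PySem.Dict.empty (PySem.List.dedup l) with hBdef
  set D := PySem.List.dedup l with hD
  refine Prod.ext_iff.mpr ⟨?_, rfl⟩
  -- keys and lookups of B
  have hkeysB : B.keys = D := by
    rw [PySem.Dict.keys, hBitems, List.map_map]
    exact List.map_id _
  have hndD : D.Nodup := PySem.List.nodup_dedup l
  have hndB : B.keys.Nodup := by rw [hkeysB]; exact hndD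
  have hgetD : ∀ c ∈ D, B.getD c "" = lab c := by
    intro c hc
    exact PySem.Dict.getD_of_mem_items B (by rw [hBitems]; exact List.mem_map_of_mem hc) hndB ""
  -- the grouping dict
  set F2 := List.foldl (fun d c => d.modify (lab c) PySem.Set.empty (fun s => PySem.Set.add s c)) PySem.Dict.empty l with hF2
  have hM0nd : (PySem.Set.ofList (l.map lab)).Nodup := PySem.Set.nodup_ofList _
  have hk2 : F2.keys = PySem.Set.ofList (l.map lab) := by
    rw [hF2]
    have h := PySem.Dict.keys_foldl_modify_key l lab PySem.Set.empty
      (fun _ c => fun s => PySem.Set.add s c) PySem.Dict.empty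
    rw [h]
    rw [show (PySem.Dict.empty : PySem.Dict String (PySem.Set String)).keys = [] from rfl,
      PySem.Set.update_nil_left]
  have hnd2 : F2.keys.Nodup := by rw [hk2]; exact hM0nd
  have hgrp : ∀ m, F2.getD m PySem.Set.empty = PySem.Set.ofList (l.filter (fun c => lab c == m)) := by
    intro m
    rw [hF2, pv_getD_grp lab l PySem.Dict.empty m, PySem.Dict.getD_empty,
      show (PySem.Set.empty : PySem.Set String) = [] from rfl, PySem.Set.update_nil_left]
  -- rewrite the A-side collation into a flatMap over the sorted labels
  rw [PySem.Dict.items_eq_map_keys F2 hnd2 PySem.Set.empty, hk2,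
    pv_sorted_map (fun k => F2.getD k PySem.Set.empty) _ hM0nd, List.foldl_map]
  simp only []
  rw [PySem.List.foldl_append_eq_flatMap, List.nil_append]
  simp only [hgrp]
  -- rewrite the B side into a Lex-key sort
  rw [pv_sorted2_lex, hkeysB]
  set M' := PySem.List.sorted (PySem.Set.ofList (l.map lab)) (fun x => x) false with hM'
  have hM'nd : M'.Nodup := (PySem.List.sorted_perm _ _ _).nodup_iff.mpr hM0nd
  have hcover : ∀ c ∈ D, lab c ∈ M' := by
    intro c hc
    rw [hM', PySem.List.mem_sorted, PySem.Set.mem_ofList]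
    exact List.mem_map_of_mem ((PySem.List.mem_dedup l c).mp hc)
  -- permutation
  have hperm1 : ∀ m ∈ M', (PySem.List.sorted (PySem.Set.ofList (l.filter (fun c => lab c == m))) (fun x => x) false).Perm
      (D.filter (fun c => lab c == m)) := by
    intro m _
    refine (PySem.List.sorted_perm _ _ _).trans ?_
    rw [List.perm_ext_iff_of_nodup (PySem.Set.nodup_ofList _) (hndD.filter _)]
    intro a
    rw [PySem.Set.mem_ofList, List.mem_filter, List.mem_filter, hD, PySem.List.mem_dedup]
  have hpermA : (M'.flatMap (fun m => PySem.List.sorted (PySem.Set.ofList (l.filter (fun c => lab c == m))) (fun x => x) false)).Perm D :=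
    (pv_flatMap_perm _ _ M' hperm1).trans (pv_partition_perm lab M' D hM'nd hcover)
  -- pairwise in the Lex key (first with the label itself)
  have hpwlab : (M'.flatMap (fun m => PySem.List.sorted (PySem.Set.ofList (l.filter (fun c => lab c == m))) (fun x => x) false)).Pairwise
      (fun a b => (toLex (lab a, a) : Lex (String × String)) < toLex (lab b, b)) := by
    rw [List.pairwise_flatMap]
    have hmemlab : ∀ m a, a ∈ PySem.List.sorted (PySem.Set.ofList (l.filter (fun c => lab c == m))) (fun x => x) false → lab a = m := by
      intro m a ha
      have := (PySem.Set.mem_ofList _ _).mp ((PySem.List.mem_sorted _ _ _ _).mp ha)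
      simpa using (List.of_mem_filter this)
    constructor
    · intro m _
      refine (PySem.List.sorted_ofList_pairwise_lt (l.filter (fun c => lab c == m))).imp_of_mem ?_
      intro a b ha hb hab
      refine Prod.Lex.lt_iff.mpr (Or.inr ⟨?_, hab⟩)
      show lab a = lab b
      rw [hmemlab m a ha, hmemlab m b hb]
    · refine (PySem.List.sorted_ofList_pairwise_lt (l.map lab)).imp ?_
      intro m1 m2 h12 x hx y hy
      refine Prod.Lex.lt_iff.mpr (Or.inl ?_)
      show lab x < lab y
      rw [hmemlab m1 x hx, hmemlab m2 y hy]
      exact h12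
  have hpw : (M'.flatMap (fun m => PySem.List.sorted (PySem.Set.ofList (l.filter (fun c => lab c == m))) (fun x => x) false)).Pairwise
      (fun a b => (toLex (B.getD a "", a) : Lex (String × String)) < toLex (B.getD b "", b)) := by
    refine hpwlab.imp_of_mem ?_
    intro a b ha hb h
    rw [hgetD a (hpermA.mem_iff.mp ha), hgetD b (hpermA.mem_iff.mp hb)]
    exact h
  exact (PySem.List.sorted_eq_of_perm_of_pairwise_lt D _ (fun c => (toLex (B.getD c "", c) : Lex (String × String))) hpermA hpw).symm

-- ===== VERDICT (by name: the statement is the Claim_ definition above) =====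
theorem sort_cell_type_pairs_spec : Claim_equal_sort_cell_type_pairs := by
  intro cell_type_pairs result_dict separator _ _
  unfold Spec_sort_cell_type_pairs
  rcases hE : (PySem.Dict.mk result_dict).get? "cell_type2microenvironments" with _ | raw
  · simp only [sort_cell_type_pairs, sort_cell_type_pairs_alt, hE]
  · simp only [sort_cell_type_pairs, sort_cell_type_pairs_alt, hE]
    exact pv_main cell_type_pairs raw separator
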